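-- pv_equiv track=rewrite | github.com/Shumaq-shoaib/APEX | static_analysis/src/v6_refactor/helpers.py | _scope_match
-- ===== SOURCE A (Python) =====
-- from typing import Dict, Any, List, Set, Iterable, Tuple, Optional
--
-- def _scope_match(required: Set[str], available_scopes: Set[str], resource: str) -> bool:
--     # loose match: "{resource}:{write}" or wildcards like "admin:*" or "*:write"
--     a = {s.lower() for s in available_scopes}
--     if not required:
--         return True
--     for need in required:
--         if need == "admin" and any(s.startswith("admin") for s in a):
--             continue
--         if need in {"write","delete"}:
--             if any(s.endswith(":write") or s.endswith(":delete") for s in a):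
--                 continue
--             if any(s.startswith(f"{resource}:") and (s.endswith(":write") or s.endswith(":delete")) for s in a):
--                 continue
--             return False
--     return True
-- ===== SOURCE B (Python) =====
-- def _scope_match(required, available_scopes, resource):
--     # Index the available scopes by the segment after their last ':' (lowercased),
--     # decide availability by set membership, then scan required with early return.
--     suffixes = set()
--     for s in available_scopes:
--         _head, sep, tail = s.lower().rpartition(":")
--         if sep:
--             suffixes.add(tail)
--     if "write" in suffixes or "delete" in suffixes:
--         return True
--     for need in required:
--         if need in ("write", "delete"):
--             return False
--     return True
-- ===== Notes on version B (the rewrite author's own statement) =====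
-- stated objective: alternative
-- what changed: B builds a suffix index once (the set of segments after each available scope's last ':', via rpartition) and decides availability by set membership of 'write'/'delete', then scans required with an early return, instead of A's per-need loop that rescans the available set with startswith/endswith branches.
import Mathlib
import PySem

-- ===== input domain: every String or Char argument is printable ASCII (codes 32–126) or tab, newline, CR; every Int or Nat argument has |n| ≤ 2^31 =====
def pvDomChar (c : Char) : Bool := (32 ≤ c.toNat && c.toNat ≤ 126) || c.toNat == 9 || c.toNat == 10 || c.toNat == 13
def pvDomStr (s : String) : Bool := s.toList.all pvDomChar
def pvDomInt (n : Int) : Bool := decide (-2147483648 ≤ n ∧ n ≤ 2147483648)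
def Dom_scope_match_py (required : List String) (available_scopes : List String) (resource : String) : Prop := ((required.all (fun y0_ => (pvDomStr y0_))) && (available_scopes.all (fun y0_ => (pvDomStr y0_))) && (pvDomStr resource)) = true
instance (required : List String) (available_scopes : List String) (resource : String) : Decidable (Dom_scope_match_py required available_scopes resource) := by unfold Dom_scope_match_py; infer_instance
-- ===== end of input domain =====

-- B builds a one-pass suffix index (set of segments after the last ':') of the available
-- scopes and decides by set membership, instead of A's per-need loop with nested scans;
-- objective: alternative (same cost, different data structure and traversal).

-- ===== PORT A =====
-- the for-loop over `required` (return False exits the loop with False, falling off the end gives True)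
def scopeMatchLoop (needs : List String) (a : List String) (resource : String) : Bool :=
  match needs with
  | [] => true
  | need :: rest =>
    if need == "admin" && a.any (fun s => PySem.Str.startswith s "admin") then
      scopeMatchLoop rest a resource
    else if need == "write" || need == "delete" then
      if a.any (fun s => PySem.Str.endswith s ":write" || PySem.Str.endswith s ":delete") then
        scopeMatchLoop rest a resource
      else if a.any (fun s => PySem.Str.startswith s (resource ++ ":") &&
                       (PySem.Str.endswith s ":write" || PySem.Str.endswith s ":delete")) then
        scopeMatchLoop rest a resource
      else
        false
    else
      scopeMatchLoop rest a resource

def scope_match_py (required : List String) (available_scopes : List String) (resource : String) : Bool :=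
  let a := PySem.Set.ofList (available_scopes.map PySem.Str.lower)
  if required.isEmpty then true
  else scopeMatchLoop required a resource

-- ===== PORT B =====
-- hand port of str.rpartition(":") restricted to what B uses: `some tail` when the
-- separator occurs (tail = segment after the LAST ':'), `none` when it does not; exact.
def rpartTail? (cs : List Char) : Option (List Char) :=
  if ':' ∈ cs then some ((cs.reverse.takeWhile (fun c => c ≠ ':')).reverse) else none

-- B's first loop: the suffix index of the available scopes
def suffixIndex (scopes : List String) : PySem.Set (List Char) :=
  scopes.foldl (fun acc s =>
    match rpartTail? (PySem.Chars.lower s.toList) with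
    | some tail => PySem.Set.add acc tail
    | none => acc) PySem.Set.empty

-- B's second loop over `required` (early `return False`)
def reqLoop (needs : List String) : Bool :=
  match needs with
  | [] => true
  | need :: rest => if need == "write" || need == "delete" then false else reqLoop rest

def scope_match_py_alt (required : List String) (available_scopes : List String) (resource : String) : Bool :=
  let suffixes := suffixIndex available_scopes
  if PySem.Set.contains suffixes "write".toList || PySem.Set.contains suffixes "delete".toList then
    true
  else
    reqLoop required

-- ===== PRECONDITION & SPEC =====
def Spec_scope_match_py (required : List String) (available_scopes : List String) (resource : String) (out : Bool) : Prop := out = scope_match_py_alt required available_scopes resource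
instance (required : List String) (available_scopes : List String) (resource : String) (out : Bool) : Decidable (Spec_scope_match_py required available_scopes resource out) := by unfold Spec_scope_match_py; infer_instance

-- ===== CLAIM (what is proved, stated in full; the proofs are below) =====
def Claim_equal_scope_match_py : Prop := ∀ (required : List String) (available_scopes : List String) (resource : String), Dom_scope_match_py required available_scopes resource → Spec_scope_match_py required available_scopes resource (scope_match_py required available_scopes resource)

-- ===== LEMMAS AND PROOFS =====

-- the resource-prefixed `any` is subsumed by the plain endswith `any`
theorem any_and_subsumed {α : Type} (a : List α) (p g : α → Bool)
    (h : a.any g = false) : a.any (fun s => p s && g s) = false := by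
  rw [List.any_eq_false] at h ⊢
  intro s hs
  simp [h s hs]

-- characterisation of A's loop: it fails iff some need is write/delete and no scope ends in :write/:delete
theorem scopeMatchLoop_eq (needs : List String) (a : List String) (resource : String) :
    scopeMatchLoop needs a resource =
      (!needs.any (fun n => n == "write" || n == "delete") ||
        a.any (fun s => PySem.Str.endswith s ":write" || PySem.Str.endswith s ":delete")) := by
  induction needs with
  | nil => simp [scopeMatchLoop]
  | cons need rest ih =>
    simp only [scopeMatchLoop]
    by_cases h1 : (need == "admin" && a.any (fun s => PySem.Str.startswith s "admin")) = true
    · have hadmin : need = "admin" := by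
        have := (Bool.and_eq_true _ _).mp h1
        exact eq_of_beq this.1
      rw [if_pos h1, ih]
      simp [hadmin]
    · rw [if_neg h1]
      by_cases h2 : (need == "write" || need == "delete") = true
      · by_cases h3 : (a.any (fun s => PySem.Str.endswith s ":write" || PySem.Str.endswith s ":delete")) = true
        · rw [if_pos h2, if_pos h3, ih, h3]
          simp
        · have h3' : (a.any (fun s => PySem.Str.endswith s ":write" || PySem.Str.endswith s ":delete")) = false :=
            Bool.eq_false_iff.mpr h3
          have h4 := any_and_subsumed a
            (fun s => PySem.Str.startswith s (resource ++ ":"))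
            (fun s => PySem.Str.endswith s ":write" || PySem.Str.endswith s ":delete") h3'
          rw [if_pos h2, if_neg h3, if_neg (Bool.eq_false_iff.mp h4), h3']
          simp [List.any_cons, h2]
      · have h2' : (need == "write" || need == "delete") = false := Bool.eq_false_iff.mpr h2
        rw [if_neg h2, ih]
        simp [List.any_cons, h2']

-- B's required-loop computes the negation of A's "some need is write/delete"
theorem reqLoop_eq (needs : List String) :
    reqLoop needs = !needs.any (fun n => n == "write" || n == "delete") := by
  induction needs with
  | nil => simp [reqLoop]
  | cons need rest ih =>
    simp only [reqLoop, List.any_cons]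
    by_cases h : (need == "write" || need == "delete") = true
    · simp [h]
    · simp [Bool.eq_false_iff.mpr h, ih]

-- `any` over set(...) of the lowered list equals `any` over the lowered elements directly
theorem any_ofList_lower (xs : List String) (p : String → Bool) :
    (PySem.Set.ofList (xs.map PySem.Str.lower)).any p = xs.any (fun s => p (PySem.Str.lower s)) := by
  have : (PySem.Set.ofList (xs.map PySem.Str.lower)).any p = (xs.map PySem.Str.lower).any p := by
    by_cases h : (xs.map PySem.Str.lower).any p = true
    · rw [h]
      rw [List.any_eq_true] at h ⊢
      obtain ⟨x, hx, hp⟩ := h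
      exact ⟨x, (PySem.Set.mem_ofList _ _).mpr hx, hp⟩
    · have h' := Bool.eq_false_iff.mpr h
      rw [h']
      rw [List.any_eq_false] at h' ⊢
      intro x hx
      exact h' x ((PySem.Set.mem_ofList _ _).mp hx)
  rw [this, List.any_map]
  rfl

-- rpartition tail is `some w` (for ':'-free w) exactly when the string ends with ':' ++ w
theorem rpartTail?_eq_some_iff (cs w : List Char) (hw : ':' ∉ w) :
    rpartTail? cs = some w ↔ PySem.Chars.endswith cs (':' :: w) = true := by
  rw [PySem.Chars.endswith_iff]
  unfold rpartTail?
  constructor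
  · intro h
    by_cases hc : ':' ∈ cs
    · rw [if_pos hc, Option.some_inj] at h
      have hdne : cs.reverse.dropWhile (fun c => c ≠ ':') ≠ [] := by
        intro hnil
        have hmem : ':' ∈ cs.reverse := List.mem_reverse.mpr hc
        rw [← List.takeWhile_append_dropWhile (p := fun c => c ≠ ':') (l := cs.reverse), hnil,
          List.append_nil] at hmem
        have := List.mem_takeWhile_imp hmem
        simp at this
      obtain ⟨d, ds, hds⟩ := List.exists_cons_of_ne_nil hdne
      have hd : d = ':' := by
        have hp := List.head_dropWhile_not (fun c => decide (c ≠ ':')) hdne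
        rw [show (cs.reverse.dropWhile (fun c => decide (c ≠ ':'))).head hdne = d from by
          simp only [hds, List.head_cons]] at hp
        simpa using hp
      refine ⟨ds.reverse, ?_⟩
      have hrev : cs.reverse = cs.reverse.takeWhile (fun c => c ≠ ':') ++ (':' :: ds) := by
        conv_lhs => rw [← List.takeWhile_append_dropWhile (p := fun c => c ≠ ':') (l := cs.reverse)]
        rw [hds, hd]
      rw [← h]
      simpa using (congrArg List.reverse hrev).symm
    · rw [if_neg hc] at h
      exact absurd h (by simp)
  · rintro ⟨pre, hpre⟩
    have hc : ':' ∈ cs := by rw [← hpre]; simp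
    rw [if_pos hc, Option.some_inj]
    have hrev : cs.reverse = w.reverse ++ ':' :: pre.reverse := by
      rw [← hpre]; simp
    rw [hrev, List.takeWhile_append_of_pos (by
      intro c hcw
      have : c ∈ w := List.mem_reverse.mp hcw
      simp only [ne_eq, decide_eq_true_eq]
      intro he; exact hw (he ▸ this))]
    simp

-- B's first loop builds exactly set( filterMap of the rpartition tails )
theorem suffixIndex_foldl (l : List String) (acc : PySem.Set (List Char)) :
    l.foldl (fun acc s =>
      match rpartTail? (PySem.Chars.lower s.toList) with
      | some tail => PySem.Set.add acc tail
      | none => acc) acc =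
    (l.filterMap (fun s => rpartTail? (PySem.Chars.lower s.toList))).foldl PySem.Set.add acc := by
  induction l generalizing acc with
  | nil => rfl
  | cons s rest ih =>
    simp only [List.foldl_cons, List.filterMap_cons]
    cases h : rpartTail? (PySem.Chars.lower s.toList) with
    | none => simp [ih]
    | some t => simp [ih]

theorem suffixIndex_eq (scopes : List String) :
    suffixIndex scopes =
      PySem.Set.ofList (scopes.filterMap (fun s => rpartTail? (PySem.Chars.lower s.toList))) := by
  rw [PySem.Set.ofList_eq_foldl]
  exact suffixIndex_foldl scopes PySem.Set.empty

-- membership in the suffix index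
theorem contains_suffixIndex (scopes : List String) (w : List Char) :
    PySem.Set.contains (suffixIndex scopes) w =
      scopes.any (fun s => rpartTail? (PySem.Chars.lower s.toList) == some w) := by
  rw [suffixIndex_eq, Bool.eq_iff_iff]
  simp [PySem.Set.contains, PySem.Set.mem_ofList, List.mem_filterMap, List.any_eq_true]

-- boolean form of the rpartition/endswith correspondence, at B's two literals
theorem rpartTail?_beq_write (cs : List Char) :
    (rpartTail? cs == some ("write".toList)) = PySem.Chars.endswith cs (":write".toList) := by
  rw [Bool.eq_iff_iff, beq_iff_eq]
  exact rpartTail?_eq_some_iff cs "write".toList (by decide)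

theorem rpartTail?_beq_delete (cs : List Char) :
    (rpartTail? cs == some ("delete".toList)) = PySem.Chars.endswith cs (":delete".toList) := by
  rw [Bool.eq_iff_iff, beq_iff_eq]
  exact rpartTail?_eq_some_iff cs "delete".toList (by decide)

-- `any` distributes over a pointwise `||`
theorem any_orB {α : Type} (l : List α) (p q : α → Bool) :
    l.any (fun x => p x || q x) = (l.any p || l.any q) := by
  rw [Bool.eq_iff_iff]
  simp only [List.any_eq_true, Bool.or_eq_true]
  constructor
  · rintro ⟨x, hx, hpq⟩
    rcases hpq with hp | hq
    · exact Or.inl ⟨x, hx, hp⟩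
    · exact Or.inr ⟨x, hx, hq⟩
  · rintro (⟨x, hx, hp⟩ | ⟨x, hx, hq⟩)
    · exact ⟨x, hx, Or.inl hp⟩
    · exact ⟨x, hx, Or.inr hq⟩

-- ===== VERDICT (by name: the statement is the Claim_ definition above) =====
theorem scope_match_py_spec : Claim_equal_scope_match_py := by
  intro required available_scopes resource _
  unfold Spec_scope_match_py scope_match_py scope_match_py_alt
  simp only [scopeMatchLoop_eq, any_ofList_lower, reqLoop_eq, contains_suffixIndex,
    rpartTail?_beq_write, rpartTail?_beq_delete, PySem.Str.endswith_eq, PySem.Str.toList_lower]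
  rw [← any_orB]
  rcases required with _ | ⟨r, rs⟩
  · simp
  · simp only [List.isEmpty_cons, Bool.false_eq_true, if_false]
    cases h : available_scopes.any (fun s =>
        PySem.Chars.endswith (PySem.Chars.lower s.toList) ":write".toList ||
        PySem.Chars.endswith (PySem.Chars.lower s.toList) ":delete".toList) <;> simp
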